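-- pv_equiv track=rewrite | github.com/encryptedtouhid/GIC-Cinema-Booking | giccinema/core/seat_allocator.py | allocate_seats
-- ===== SOURCE A (Python) =====
-- def allocate_seats(seating_chart, num_tickets, custom_position=None):
--     rows = len(seating_chart)
--     seats_per_row = len(seating_chart[0])
--
--     if custom_position:
--         row_idx, col_idx = custom_position
--         seats = []
--         for c in range(col_idx, min(col_idx + num_tickets, seats_per_row)):
--             if seating_chart[row_idx][c] != '.':
--                 return []
--             seats.append((row_idx, c))
--         return seats
--
--     for row_idx in range(rows - 1, -1, -1):  # Start from last row
--         for col_idx in range(seats_per_row // 2 - num_tickets // 2, seats_per_row):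
--             if col_idx + num_tickets <= seats_per_row and all(
--                     seating_chart[row_idx][c] == '.' for c in range(col_idx, col_idx + num_tickets)):
--                 return [(row_idx, c) for c in range(col_idx, col_idx + num_tickets)]
--     return []
-- ===== SOURCE B (Python) =====
-- def allocate_seats(seating_chart, num_tickets, custom_position=None):
--     cols = len(seating_chart[0])
--
--     if custom_position:
--         r, c = custom_position
--         end = min(c + num_tickets, cols)
--         if all(seating_chart[r][cc] == '.' for cc in range(c, end)):
--             return [(r, cc) for cc in range(c, end)]
--         return []
--
--     if num_tickets <= 0 or num_tickets > cols:
--         return []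
--
--     k = num_tickets
--     start = cols // 2 - k // 2
--     for row_idx in range(len(seating_chart) - 1, -1, -1):
--         row = seating_chart[row_idx]
--         # occupied-seat count of the sliding window [j, j+k), updated in O(1) per shift
--         occ = sum(1 for cc in range(start, start + k) if row[cc] != '.')
--         j = start
--         while True:
--             if occ == 0:
--                 return [(row_idx, cc) for cc in range(j, j + k)]
--             if j + k >= cols:
--                 break
--             occ -= row[j] != '.'
--             occ += row[j + k] != '.'
--             j += 1
--     return []
-- ===== Notes on version B (the rewrite author's own statement) =====
-- stated objective: faster
-- what changed: Per row, B maintains a sliding-window occupied-seat count updated in O(1) per shift instead of A's rescan of every num_tickets-wide window, and B rejects requests larger than a row up front.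
-- intended difference: When num_tickets = cols+1 with cols odd and some row is entirely free, A's centre column underflows to -1 and it returns a phantom block [(r,-1),(r,0),...,(r,cols-1)] that double-books the last seat via negative indexing; B returns [] because a block larger than a row cannot exist, which is the intended answer. — e.g. on allocate_seats([["."]], 2, none): A returns [(0, -1), (0, 0)], B returns []
-- outside the precondition, e.g. on allocate_seats([['.', '.'], ['#']], 2, None): A returns [(0, 0), (0, 1)], B raises IndexError; on allocate_seats([['.', '.'], ['#']], 2, (1, 0)): A returns [], B returns []
import Mathlib
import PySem

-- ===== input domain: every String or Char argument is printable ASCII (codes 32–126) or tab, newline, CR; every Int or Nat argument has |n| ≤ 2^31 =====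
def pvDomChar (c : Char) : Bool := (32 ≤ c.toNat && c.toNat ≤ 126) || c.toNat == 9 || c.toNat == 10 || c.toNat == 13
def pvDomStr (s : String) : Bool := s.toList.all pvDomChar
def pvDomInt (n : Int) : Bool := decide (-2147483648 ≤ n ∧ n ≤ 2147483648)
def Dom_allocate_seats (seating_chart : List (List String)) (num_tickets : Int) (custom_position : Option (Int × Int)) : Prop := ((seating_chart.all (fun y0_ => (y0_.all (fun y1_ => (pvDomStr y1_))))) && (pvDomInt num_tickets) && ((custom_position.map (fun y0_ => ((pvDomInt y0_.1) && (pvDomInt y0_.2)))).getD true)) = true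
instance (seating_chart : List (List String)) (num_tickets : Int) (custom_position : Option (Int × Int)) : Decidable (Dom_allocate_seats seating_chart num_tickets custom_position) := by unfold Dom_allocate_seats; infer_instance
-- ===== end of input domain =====

-- B replaces A's per-window rescan by a per-row sliding occupied-seat count and rejects
-- requests wider than a row up front, where A's centre column underflows (see D_ below).

-- ===== PORT A =====
def pvA_custom (seating_chart : List (List String)) (r : Int) : List Int → List (Int × Int) → List (Int × Int)
  | [], acc => acc
  | c :: rest, acc =>
    if PySem.List.pyGetD (PySem.List.pyGetD seating_chart r []) c "" == "." then
      pvA_custom seating_chart r rest (acc ++ [(r, c)])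
    else []

def pvA_inner (seating_chart : List (List String)) (cols k r : Int) : List Int → Option (List (Int × Int))
  | [] => none
  | c :: rest =>
    if c + k ≤ cols ∧ (PySem.List.pyRange c (c + k) 1).all
        (fun cc => PySem.List.pyGetD (PySem.List.pyGetD seating_chart r []) cc "" == ".") then
      some ((PySem.List.pyRange c (c + k) 1).map (fun cc => (r, cc)))
    else pvA_inner seating_chart cols k r rest

def pvA_rows (seating_chart : List (List String)) (cols k start : Int) : List Int → List (Int × Int)
  | [] => []
  | r :: rest =>
    match pvA_inner seating_chart cols k r (PySem.List.pyRange start cols 1) with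
    | some res => res
    | none => pvA_rows seating_chart cols k start rest

def allocate_seats (seating_chart : List (List String)) (num_tickets : Int) (custom_position : Option (Int × Int)) : List (Int × Int) :=
  let rows : Int := seating_chart.length
  let cols : Int := PySem.List.len (PySem.List.pyGetD seating_chart 0 [])
  match custom_position with
  | some (r, c) => pvA_custom seating_chart r (PySem.List.pyRange c (min (c + num_tickets) cols) 1) []
  | none =>
    pvA_rows seating_chart cols num_tickets
      (PySem.Int.floordiv cols 2 - PySem.Int.floordiv num_tickets 2)
      (PySem.List.pyRange (rows - 1) (-1) (-1))

-- ===== PORT B =====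
def pvB_occ0 (row : List String) (start k : Int) : Int :=
  ((PySem.List.pyRange start (start + k) 1).countP
    (fun cc => !(PySem.List.pyGetD row cc "" == ".")) : Nat)

def pvB_scan (row : List String) (r cols k j occ : Int) : Option (List (Int × Int)) :=
  if occ = 0 then some ((PySem.List.pyRange j (j + k) 1).map (fun cc => (r, cc)))
  else if cols ≤ j + k then none
  else pvB_scan row r cols k (j + 1)
    (occ - (if !(PySem.List.pyGetD row j "" == ".") then 1 else 0)
         + (if !(PySem.List.pyGetD row (j + k) "" == ".") then 1 else 0))
termination_by (cols - (j + k)).toNat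
decreasing_by omega

def pvB_rows (seating_chart : List (List String)) (cols k start : Int) : List Int → List (Int × Int)
  | [] => []
  | r :: rest =>
    let row := PySem.List.pyGetD seating_chart r []
    match pvB_scan row r cols k start (pvB_occ0 row start k) with
    | some res => res
    | none => pvB_rows seating_chart cols k start rest

def allocate_seats_alt (seating_chart : List (List String)) (num_tickets : Int) (custom_position : Option (Int × Int)) : List (Int × Int) :=
  let cols : Int := PySem.List.len (PySem.List.pyGetD seating_chart 0 [])
  match custom_position with
  | some (r, c) =>
    let cs := PySem.List.pyRange c (min (c + num_tickets) cols) 1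
    if cs.all (fun cc => PySem.List.pyGetD (PySem.List.pyGetD seating_chart r []) cc "" == ".") then
      cs.map (fun cc => (r, cc))
    else []
  | none =>
    if num_tickets ≤ 0 ∨ cols < num_tickets then []
    else
      pvB_rows seating_chart cols num_tickets
        (PySem.Int.floordiv cols 2 - PySem.Int.floordiv num_tickets 2)
        (PySem.List.pyRange ((seating_chart.length : Int) - 1) (-1) (-1))

-- ===== PRECONDITION & SPEC =====
-- Pre_ excludes exactly the inputs on which A can hit an IndexError: the empty chart, search
-- requests over a chart with some row shorter than row 0 (A may raise while scanning it; on some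
-- such charts A happens to return before touching an out-of-range index — see the cites), and
-- custom positions whose row index or scanned column range is out of bounds for the addressed row.
def Pre_allocate_seats (seating_chart : List (List String)) (num_tickets : Int) (custom_position : Option (Int × Int)) : Prop :=
  seating_chart ≠ [] ∧
  (custom_position.isNone →
    ∀ row ∈ seating_chart, (PySem.List.pyGetD seating_chart 0 []).length ≤ row.length) ∧
  custom_position.all (fun p =>
    !(decide (0 < num_tickets) && decide (p.2 < ((PySem.List.pyGetD seating_chart 0 []).length : Int))) ||
    (decide (-(seating_chart.length : Int) ≤ p.1) && decide (p.1 < (seating_chart.length : Int)) &&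
     decide (-(((PySem.List.pyGetD seating_chart p.1 []).length : Int)) ≤ p.2) &&
     decide (min (p.2 + num_tickets) (((PySem.List.pyGetD seating_chart 0 []).length : Int)) ≤
             ((PySem.List.pyGetD seating_chart p.1 []).length : Int)))) = true
instance (seating_chart : List (List String)) (num_tickets : Int) (custom_position : Option (Int × Int)) : Decidable (Pre_allocate_seats seating_chart num_tickets custom_position) := by unfold Pre_allocate_seats; infer_instance

def pvWitness_allocate_seats : List (List String) × Int × (Option (Int × Int)) := ([[".", "."]], 1, none)

-- When num_tickets = cols+1 with cols odd and some row is entirely free, A's centre column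
-- underflows to -1 and it returns a phantom block [(r,-1),(r,0),...,(r,cols-1)] that double-books
-- the last seat via negative indexing; B returns [] because a block larger than a row cannot
-- exist, which is the intended answer.
def D_allocate_seats (seating_chart : List (List String)) (num_tickets : Int) (custom_position : Option (Int × Int)) : Prop :=
  custom_position = none ∧
  num_tickets = ((PySem.List.pyGetD seating_chart 0 []).length : Int) + 1 ∧
  PySem.Int.mod ((PySem.List.pyGetD seating_chart 0 []).length : Int) 2 = 1 ∧
  seating_chart.any (fun row =>
    (PySem.List.pyGetD row (-1) "" == ".") &&
    (PySem.List.pyRange 0 ((PySem.List.pyGetD seating_chart 0 []).length : Int) 1).all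
      (fun c => PySem.List.pyGetD row c "" == ".")) = true
instance (seating_chart : List (List String)) (num_tickets : Int) (custom_position : Option (Int × Int)) : Decidable (D_allocate_seats seating_chart num_tickets custom_position) := by unfold D_allocate_seats; infer_instance

def Spec_allocate_seats (seating_chart : List (List String)) (num_tickets : Int) (custom_position : Option (Int × Int)) (out : List (Int × Int)) : Prop := ¬ D_allocate_seats seating_chart num_tickets custom_position → out = allocate_seats_alt seating_chart num_tickets custom_position
instance (seating_chart : List (List String)) (num_tickets : Int) (custom_position : Option (Int × Int)) (out : List (Int × Int)) : Decidable (Spec_allocate_seats seating_chart num_tickets custom_position out) := by unfold Spec_allocate_seats; infer_instance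

def pvDiffWitness_allocate_seats : List (List String) × Int × (Option (Int × Int)) := ([["."]], 2, none)
def pvDiffWitnessOut_allocate_seats : (List (Int × Int)) × (List (Int × Int)) := ([(0, -1), (0, 0)], [])

-- ===== CLAIM (what is proved, stated in full; the proofs are below) =====
def Claim_unchanged_allocate_seats : Prop := ∀ (seating_chart : List (List String)) (num_tickets : Int) (custom_position : Option (Int × Int)), Dom_allocate_seats seating_chart num_tickets custom_position → Pre_allocate_seats seating_chart num_tickets custom_position → Spec_allocate_seats seating_chart num_tickets custom_position (allocate_seats seating_chart num_tickets custom_position)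
def Claim_changed_allocate_seats : Prop := Dom_allocate_seats (pvDiffWitness_allocate_seats.1) (pvDiffWitness_allocate_seats.2.1) (pvDiffWitness_allocate_seats.2.2) ∧ Pre_allocate_seats (pvDiffWitness_allocate_seats.1) (pvDiffWitness_allocate_seats.2.1) (pvDiffWitness_allocate_seats.2.2) ∧ D_allocate_seats (pvDiffWitness_allocate_seats.1) (pvDiffWitness_allocate_seats.2.1) (pvDiffWitness_allocate_seats.2.2) ∧ allocate_seats (pvDiffWitness_allocate_seats.1) (pvDiffWitness_allocate_seats.2.1) (pvDiffWitness_allocate_seats.2.2) = pvDiffWitnessOut_allocate_seats.1 ∧ allocate_seats_alt (pvDiffWitness_allocate_seats.1) (pvDiffWitness_allocate_seats.2.1) (pvDiffWitness_allocate_seats.2.2) = pvDiffWitnessOut_allocate_seats.2 ∧ pvDiffWitnessOut_allocate_seats.1 ≠ pvDiffWitnessOut_allocate_seats.2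
def Claim_exact_allocate_seats : Prop := ∀ (seating_chart : List (List String)) (num_tickets : Int) (custom_position : Option (Int × Int)), Dom_allocate_seats seating_chart num_tickets custom_position → Pre_allocate_seats seating_chart num_tickets custom_position → D_allocate_seats seating_chart num_tickets custom_position → allocate_seats seating_chart num_tickets custom_position ≠ allocate_seats_alt seating_chart num_tickets custom_position

-- ===== LEMMAS AND PROOFS =====

theorem pv_custom_eq (chart : List (List String)) (r : Int) (cs : List Int) (acc : List (Int × Int)) :
    pvA_custom chart r cs acc =
      if cs.all (fun cc => PySem.List.pyGetD (PySem.List.pyGetD chart r []) cc "" == ".") then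
        acc ++ cs.map (fun cc => (r, cc))
      else [] := by
  induction cs generalizing acc with
  | nil => simp [pvA_custom]
  | cons c rest ih =>
    simp only [pvA_custom, List.all_cons, List.map_cons]
    by_cases h : (PySem.List.pyGetD (PySem.List.pyGetD chart r []) c "" == ".") = true
    · rw [if_pos h, ih, h]
      by_cases h2 : rest.all (fun cc => PySem.List.pyGetD (PySem.List.pyGetD chart r []) cc "" == ".") = true
      · simp [h2]
      · simp [h2]
    · rw [if_neg h]
      simp [Bool.eq_false_iff.mpr h]

theorem pv_inner_none_iff (chart : List (List String)) (cols k r : Int) (cs : List Int) :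
    pvA_inner chart cols k r cs = none ↔
      ∀ c ∈ cs, ¬(c + k ≤ cols ∧ (PySem.List.pyRange c (c + k) 1).all
        (fun cc => PySem.List.pyGetD (PySem.List.pyGetD chart r []) cc "" == ".") = true) := by
  induction cs with
  | nil => simp [pvA_inner]
  | cons c rest ih =>
    simp only [pvA_inner, List.mem_cons]
    by_cases h : c + k ≤ cols ∧ (PySem.List.pyRange c (c + k) 1).all
        (fun cc => PySem.List.pyGetD (PySem.List.pyGetD chart r []) cc "" == ".") = true
    · rw [if_pos h]
      constructor
      · intro hs; exact (Option.some_ne_none _ hs).elim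
      · intro hall; exact absurd h (hall c (Or.inl rfl))
    · rw [if_neg h, ih]
      constructor
      · rintro hall cc (rfl | hm)
        · exact h
        · exact hall cc hm
      · intro hall cc hm; exact hall cc (Or.inr hm)

theorem pv_occ_slide (row : List String) (j k : Int) (hk : 0 < k) :
    pvB_occ0 row (j + 1) k =
      pvB_occ0 row j k - (if !(PySem.List.pyGetD row j "" == ".") then 1 else 0)
        + (if !(PySem.List.pyGetD row (j + k) "" == ".") then 1 else 0) := by
  unfold pvB_occ0
  have h1 : PySem.List.pyRange j (j + k) 1 = j :: PySem.List.pyRange (j + 1) (j + k) 1 :=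
    PySem.List.pyRange_one_cons (by omega)
  have h2 : PySem.List.pyRange (j + 1) (j + 1 + k) 1
      = PySem.List.pyRange (j + 1) (j + k) 1 ++ [j + k] := by
    have h := PySem.List.pyRange_one_succ_right (a := j + 1) (b := j + k) (by omega)
    rw [show j + 1 + k = j + k + 1 by ring, h]
  rw [h1, h2, List.countP_cons, List.countP_append]
  by_cases hj : (PySem.List.pyGetD row j "" == ".") = true <;>
    by_cases hjk : (PySem.List.pyGetD row (j + k) "" == ".") = true <;>
      simp [hj, hjk]

theorem pv_allfree_iff (row : List String) (j k : Int) :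
    pvB_occ0 row j k = 0 ↔
      ((PySem.List.pyRange j (j + k) 1).all (fun cc => PySem.List.pyGetD row cc "" == ".")) = true := by
  unfold pvB_occ0
  rw [Int.natCast_eq_zero, List.countP_eq_zero, List.all_eq_true]
  simp

theorem pv_scan_eq (chart : List (List String)) (cols k r : Int) (hk : 0 < k) :
    ∀ (n : Nat) (j : Int), n = (cols - (j + k)).toNat → j + k ≤ cols →
    pvA_inner chart cols k r (PySem.List.pyRange j cols 1) =
      pvB_scan (PySem.List.pyGetD chart r []) r cols k j
        (pvB_occ0 (PySem.List.pyGetD chart r []) j k) := by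
  intro n
  induction n with
  | zero =>
    intro j hn hle
    have hjc : j + k = cols := by omega
    rw [PySem.List.pyRange_one_cons (show j < cols by omega)]
    rw [pvB_scan]
    by_cases h0 : pvB_occ0 (PySem.List.pyGetD chart r []) j k = 0
    · rw [if_pos h0]
      simp only [pvA_inner]
      rw [if_pos ⟨hle, (pv_allfree_iff _ _ _).mp h0⟩]
    · rw [if_neg h0, if_pos (by omega : cols ≤ j + k)]
      simp only [pvA_inner]
      rw [if_neg]
      · rw [pv_inner_none_iff]
        intro c hc
        have := (PySem.List.mem_pyRange_one).mp hc
        rintro ⟨h1, -⟩; omega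
      · rintro ⟨-, hall⟩
        exact h0 ((pv_allfree_iff _ _ _).mpr hall)
  | succ m ih =>
    intro j hn hle
    have hlt : j + k < cols := by omega
    rw [PySem.List.pyRange_one_cons (show j < cols by omega)]
    rw [pvB_scan]
    by_cases h0 : pvB_occ0 (PySem.List.pyGetD chart r []) j k = 0
    · rw [if_pos h0]
      simp only [pvA_inner]
      rw [if_pos ⟨hle, (pv_allfree_iff _ _ _).mp h0⟩]
    · rw [if_neg h0, if_neg (by omega : ¬ cols ≤ j + k)]
      simp only [pvA_inner]
      rw [if_neg]
      · rw [← pv_occ_slide _ _ _ hk, ih (j + 1) (by omega) (by omega)]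
      · rintro ⟨-, hall⟩
        exact h0 ((pv_allfree_iff _ _ _).mpr hall)

theorem pv_rows_eq (chart : List (List String)) (cols k start : Int) (hk : 0 < k)
    (hs : start + k ≤ cols) (rs : List Int) :
    pvA_rows chart cols k start rs = pvB_rows chart cols k start rs := by
  induction rs with
  | nil => rfl
  | cons r rest ih =>
    simp only [pvA_rows, pvB_rows]
    rw [pv_scan_eq chart cols k r hk _ start rfl hs, ih]

theorem pv_rows_nil_of_nonpos (chart : List (List String)) (cols k start : Int) (hk : k ≤ 0)
    (rs : List Int) : pvA_rows chart cols k start rs = [] := by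
  induction rs with
  | nil => rfl
  | cons r rest ih =>
    simp only [pvA_rows]
    by_cases hsc : start < cols
    · rw [PySem.List.pyRange_one_cons hsc]
      simp only [pvA_inner]
      rw [if_pos ⟨by omega, by rw [PySem.List.pyRange_one_eq_nil (by omega)]; rfl⟩]
      rw [PySem.List.pyRange_one_eq_nil (by omega)]
      rfl
    · rw [PySem.List.pyRange_one_eq_nil (by omega)]
      simp only [pvA_inner]
      exact ih

theorem pv_rows_none (chart : List (List String)) (cols k start : Int) (rs : List Int)
    (h : ∀ r ∈ rs, pvA_inner chart cols k r (PySem.List.pyRange start cols 1) = none) :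
    pvA_rows chart cols k start rs = [] := by
  induction rs with
  | nil => rfl
  | cons r rest ih =>
    simp only [pvA_rows]
    rw [h r (List.mem_cons_self)]
    exact ih fun r hr => h r (List.mem_cons_of_mem _ hr)

theorem pv_main (chart : List (List String)) (k : Int) (cp : Option (Int × Int))
    (hD : ¬ D_allocate_seats chart k cp) :
    allocate_seats chart k cp = allocate_seats_alt chart k cp := by
  cases cp with
  | some p =>
    obtain ⟨r, c⟩ := p
    simp only [allocate_seats, allocate_seats_alt]
    rw [pv_custom_eq]
    split <;> simp
  | none =>
    simp only [allocate_seats, allocate_seats_alt, PySem.List.len_eq]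
    by_cases hk : k ≤ 0
    · rw [if_pos (Or.inl hk), pv_rows_nil_of_nonpos _ _ _ _ hk]
    · by_cases hkc : (((PySem.List.pyGetD chart 0 []).length : Int)) < k
      · rw [if_pos (Or.inr hkc)]
        apply pv_rows_none
        intro r hr
        rw [pv_inner_none_iff]
        intro c hc
        rintro ⟨hck, hall⟩
        have hcm := PySem.List.mem_pyRange_one.mp hc
        have hrm := PySem.List.mem_pyRange_neg_one.mp hr
        rw [PySem.Int.floordiv_eq_ediv_of_pos (by norm_num),
            PySem.Int.floordiv_eq_ediv_of_pos (by norm_num)] at hcm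
        have hc0 : (0:Int) ≤ ((PySem.List.pyGetD chart 0 []).length : Int) := by positivity
        have hkeq : k = ((PySem.List.pyGetD chart 0 []).length : Int) + 1 := by omega
        have hceq : c = -1 := by omega
        have hmod : ((PySem.List.pyGetD chart 0 []).length : Int) % 2 = 1 := by omega
        apply hD
        refine ⟨rfl, hkeq, by rw [PySem.Int.mod_eq_emod_of_pos (by norm_num)]; exact hmod, ?_⟩
        rw [List.any_eq_true]
        refine ⟨PySem.List.pyGetD chart r [], PySem.List.pyGetD_mem _ _ (by simp [PySem.Raise.InRange]; omega), ?_⟩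
        subst hceq hkeq
        rw [show (-1:Int) + (((PySem.List.pyGetD chart 0 []).length : Int) + 1)
              = ((PySem.List.pyGetD chart 0 []).length : Int) by ring] at hall
        rw [PySem.List.pyRange_one_cons (by omega)] at hall
        simp only [List.all_cons, Bool.and_eq_true] at hall
        simp only [Bool.and_eq_true]
        exact ⟨hall.1, by rw [show (-1:Int) + 1 = 0 by ring] at hall; exact hall.2⟩
      · rw [if_neg (by omega)]
        apply pv_rows_eq
        · omega
        · rw [PySem.Int.floordiv_eq_ediv_of_pos (by norm_num),
              PySem.Int.floordiv_eq_ediv_of_pos (by norm_num)]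
          have hc0 : (0:Int) ≤ ((PySem.List.pyGetD chart 0 []).length : Int) := by positivity
          omega

theorem pv_inner_some_ne_nil (chart : List (List String)) (cols k r : Int) (hk : 0 < k)
    (cs : List Int) (res : List (Int × Int))
    (h : pvA_inner chart cols k r cs = some res) : res ≠ [] := by
  induction cs with
  | nil => simp [pvA_inner] at h
  | cons c rest ih =>
    simp only [pvA_inner] at h
    split at h
    · cases h
      rw [PySem.List.pyRange_one_cons (by omega : c < c + k)]
      simp
    · exact ih h

theorem pv_rows_ne_nil (chart : List (List String)) (cols k start : Int) (hk : 0 < k)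
    (rs : List Int) (r : Int) (hr : r ∈ rs)
    (hne : pvA_inner chart cols k r (PySem.List.pyRange start cols 1) ≠ none) :
    pvA_rows chart cols k start rs ≠ [] := by
  induction rs with
  | nil => cases hr
  | cons r0 rest ih =>
    simp only [pvA_rows]
    rcases hmatch : pvA_inner chart cols k r0 (PySem.List.pyRange start cols 1) with _ | res
    · rcases List.mem_cons.mp hr with rfl | hr'
      · exact absurd hmatch hne
      · exact ih hr'
    · exact pv_inner_some_ne_nil chart cols k r0 hk _ res hmatch

theorem pv_tight (chart : List (List String)) (k : Int) (cp : Option (Int × Int)) (hD : D_allocate_seats chart k cp) :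
    allocate_seats chart k cp ≠ allocate_seats_alt chart k cp := by
  obtain ⟨hcp, hkeq, hmod, hany⟩ := hD
  subst hcp
  simp only [allocate_seats, allocate_seats_alt, PySem.List.len_eq]
  have hc0 : (0:Int) ≤ ((PySem.List.pyGetD chart 0 []).length : Int) := by positivity
  rw [PySem.Int.mod_eq_emod_of_pos (by norm_num)] at hmod
  rw [if_pos (Or.inr (by omega))]
  rw [List.any_eq_true] at hany
  obtain ⟨row, hrow, hpred⟩ := hany
  obtain ⟨n, hn, rfl⟩ := List.mem_iff_getElem.mp hrow
  have hrowget : PySem.List.pyGetD chart (n : Int) [] = chart[n] := by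
    rw [PySem.List.pyGetD_natCast]
    exact List.getD_eq_getElem _ _ hn
  apply pv_rows_ne_nil chart _ k _ (by omega) _ (n : Int)
  · rw [PySem.List.mem_pyRange_neg_one]
    constructor
    · omega
    · have : n < chart.length := hn
      omega
  · intro hnone
    rw [pv_inner_none_iff] at hnone
    have hstart : PySem.Int.floordiv ((PySem.List.pyGetD chart 0 []).length : Int) 2 -
        PySem.Int.floordiv k 2 = -1 := by
      rw [PySem.Int.floordiv_eq_ediv_of_pos (by norm_num),
          PySem.Int.floordiv_eq_ediv_of_pos (by norm_num)]
      omega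
    apply hnone (-1)
    · rw [PySem.List.mem_pyRange_one, hstart]
      omega
    · constructor
      · omega
      · rw [show (-1:Int) + k = ((PySem.List.pyGetD chart 0 []).length : Int) by omega]
        rw [PySem.List.pyRange_one_cons (by omega), List.all_cons]
        simp only [Bool.and_eq_true] at hpred ⊢
        rw [hrowget]
        exact ⟨hpred.1, by rw [show (-1:Int) + 1 = 0 by ring]; exact hpred.2⟩

-- ===== VERDICT (by name: the statements are the Claim_ definitions above) =====
theorem allocate_seats_spec : Claim_unchanged_allocate_seats := by
  intro chart k cp _ _ hD
  exact pv_main chart k cp hD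

theorem allocate_seats_changed : Claim_changed_allocate_seats := by
  unfold Claim_changed_allocate_seats; decide

theorem allocate_seats_tight : Claim_exact_allocate_seats := by
  intro chart k cp _ _ hD
  exact pv_tight chart k cp hD
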